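-- pv_equiv track=rewrite | github.com/Leviathantheesper/PosetResolutionCalc | Basis_calc2.py | equal_up_to_sign
-- ===== SOURCE A (Python) =====
-- def equal_up_to_sign(unsigned_column,signed_column):
--     """
--     Parameters
--     ----------
--     unsigned_column : TYPE
--         DESCRIPTION.
--     signed_column : TYPE
--         DESCRIPTION.
--
--     Returns
--     -------
--     bool
--         DESCRIPTION.
--
--     """
--     unsigned_set=set(unsigned_column)
--     signed_set=set(signed_column)
--     if '0' in signed_set:
--         signed_set.remove('0')
--     if len(unsigned_set)!=len(signed_set):
--         return False
--     for stringy in unsigned_set: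
--         if stringy not in signed_set and "-"+stringy not in signed_set:
--             return False
--     return True
-- ===== SOURCE B (Python) =====
-- def _subset_sorted(xs, ys):
--     # xs, ys strictly increasing; is every element of xs present in ys?
--     while xs:
--         if not ys:
--             return False
--         if ys[0] < xs[0]:
--             ys = ys[1:]
--         elif ys[0] == xs[0]:
--             xs = xs[1:]
--             ys = ys[1:]
--         else:
--             return False
--     return True
--
--
-- def equal_up_to_sign(unsigned_column, signed_column):
--     signed = sorted(set(signed_column) - {'0'})
--     unsigned = sorted(set(unsigned_column))
--     if len(unsigned) != len(signed):
--         return False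
--     origins = sorted(set(signed) | {t[1:] for t in signed if t.startswith('-')})
--     return _subset_sorted(unsigned, origins)
-- ===== Notes on version B (the rewrite author's own statement) =====
-- stated objective: alternative
-- what changed: B replaces A's hash-set membership loop (each element tested raw and with '-' prepended) by a sort-then-scan algorithm: it sorts the distinct unsigned values and the sorted set of acceptable values (signed values plus sign-stripped ones) and decides containment with a single two-pointer merge over the two strictly increasing lists.
import Mathlib
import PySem

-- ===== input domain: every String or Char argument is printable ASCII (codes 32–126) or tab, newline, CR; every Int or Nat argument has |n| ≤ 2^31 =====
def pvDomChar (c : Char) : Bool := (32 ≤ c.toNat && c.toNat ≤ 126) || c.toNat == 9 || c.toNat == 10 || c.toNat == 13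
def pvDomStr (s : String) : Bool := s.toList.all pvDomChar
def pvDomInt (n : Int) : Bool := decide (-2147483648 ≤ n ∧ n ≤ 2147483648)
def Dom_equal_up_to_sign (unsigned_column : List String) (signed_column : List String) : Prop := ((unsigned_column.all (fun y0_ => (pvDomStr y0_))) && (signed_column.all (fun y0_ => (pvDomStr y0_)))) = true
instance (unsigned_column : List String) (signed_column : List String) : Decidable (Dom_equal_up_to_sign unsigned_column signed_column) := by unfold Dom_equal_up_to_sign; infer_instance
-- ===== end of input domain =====

-- B replaces A's set-membership loop by a sort-then-scan algorithm: sorted distinct lists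
-- and a two-pointer merge deciding containment; alternative algorithm, same result.

-- ===== PORT A =====
-- the 'for stringy in unsigned_set' loop with early 'return False' (order-independent result)
def pvALoop (signed_set : PySem.Set String) : List String → Bool
  | [] => true
  | stringy :: rest =>
      if !(PySem.Set.contains signed_set stringy)
         && !(PySem.Set.contains signed_set ("-" ++ stringy)) then false
      else pvALoop signed_set rest

def equal_up_to_sign (unsigned_column : List String) (signed_column : List String) : Bool :=
  let unsigned_set := PySem.Set.ofList unsigned_column
  let signed_set0 := PySem.Set.ofList signed_column
  -- if '0' in signed_set: signed_set.remove('0')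
  let signed_set := if PySem.Set.contains signed_set0 "0"
                    then PySem.Set.discard signed_set0 "0" else signed_set0
  if PySem.Set.len unsigned_set ≠ PySem.Set.len signed_set then false
  else pvALoop signed_set unsigned_set

-- ===== PORT B =====
-- the '_subset_sorted' while loop, popping the head of xs / ys as the loop does
def pvSubsetSorted : List String → List String → Bool
  | [], _ => true
  | _ :: _, [] => false
  | x :: xs, y :: ys =>
      if y < x then pvSubsetSorted (x :: xs) ys
      else if y == x then pvSubsetSorted xs ys
      else false

def equal_up_to_sign_alt (unsigned_column : List String) (signed_column : List String) : Bool :=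
  let signed := PySem.List.sorted
    (PySem.Set.diff (PySem.Set.ofList signed_column) (PySem.Set.ofList ["0"])) (fun x => x) false
  let unsigned := PySem.List.sorted (PySem.Set.ofList unsigned_column) (fun x => x) false
  if unsigned.length ≠ signed.length then false
  else
    let origins := PySem.List.sorted
      (PySem.Set.union (PySem.Set.ofList signed)
        (PySem.Set.ofList ((signed.filter (fun t => PySem.Str.startswith t "-")).map
          (fun t => PySem.Str.slice t (some 1) none)))) (fun x => x) false
    pvSubsetSorted unsigned origins

-- ===== PRECONDITION & SPEC =====
def Spec_equal_up_to_sign (unsigned_column : List String) (signed_column : List String) (out : Bool) : Prop := out = equal_up_to_sign_alt unsigned_column signed_column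
instance (unsigned_column : List String) (signed_column : List String) (out : Bool) : Decidable (Spec_equal_up_to_sign unsigned_column signed_column out) := by unfold Spec_equal_up_to_sign; infer_instance

-- ===== CLAIM (what is proved, stated in full; the proofs are below) =====
def Claim_equal_equal_up_to_sign : Prop := ∀ (unsigned_column : List String) (signed_column : List String), Dom_equal_up_to_sign unsigned_column signed_column → Spec_equal_up_to_sign unsigned_column signed_column (equal_up_to_sign unsigned_column signed_column)

-- ===== LEMMAS AND PROOFS =====

-- A's loop is the order-independent 'all' of its per-element test
theorem pvALoop_eq_all (ss : PySem.Set String) (l : List String) :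
    pvALoop ss l
      = l.all (fun x => PySem.Set.contains ss x || PySem.Set.contains ss ("-" ++ x)) := by
  induction l with
  | nil => rfl
  | cons x rest ih =>
      cases hc1 : PySem.Set.contains ss x <;>
        cases hc2 : PySem.Set.contains ss ("-" ++ x) <;>
          simp [pvALoop, ih]

-- removing an absent element leaves the set unchanged
theorem pvDiscard_of_not_mem (s : PySem.Set String) (x : String) (h : x ∉ s) :
    PySem.Set.discard s x = s := by
  simp only [PySem.Set.discard]
  rw [List.filter_eq_self]
  intro a ha
  simp only [Bool.not_eq_true', beq_eq_false_iff_ne, ne_eq]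
  rintro rfl; exact h ha

-- set(s) - {'0'} is the same list as A's conditional remove('0')
theorem pvDiff_singleton (s : PySem.Set String) :
    PySem.Set.diff s (PySem.Set.ofList ["0"]) = PySem.Set.discard s "0" := by
  simp only [PySem.Set.diff, PySem.Set.discard]
  apply List.filter_congr
  intro a _
  simp [PySem.Set.ofList, PySem.Set.add, PySem.Set.contains, PySem.Set.empty, List.contains_eq_mem,
    eq_comm]
  exact Bool.beq_eq_decide_eq a "0"

-- strings: t starts with '-' and t[1:] = x  ↔  t = "-" ++ x
theorem pvStrip_iff (t x : String) :
    (PySem.Str.startswith t "-" = true ∧ PySem.Str.slice t (some 1) none = x)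
      ↔ t = "-" ++ x := by
  rw [← String.toList_inj (s₁ := t), String.toList_append,
      ← String.toList_inj (s₁ := PySem.Str.slice t (some 1) none),
      PySem.Str.toList_slice, PySem.Chars.slice_eq_listSlice,
      PySem.Str.startswith_eq, PySem.Chars.startswith_iff]
  have h1 : PySem.List.slice t.toList (some 1) none = t.toList.drop 1 := by
    have := PySem.List.slice_from_natCast t.toList 1
    simpa using this
  rw [h1]
  cases t.toList with
  | nil => simp
  | cons c cs =>
      show ('-' :: List.nil <+: c :: cs ∧ _) ↔ _
      rw [List.cons_prefix_cons]
      simp [eq_comm, and_comm]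

-- membership in B's 'origins' collection is exactly A's per-element test
theorem pvMem_origins (ss : List String) (x : String) :
    (x ∈ PySem.Set.union (PySem.Set.ofList ss)
        (PySem.Set.ofList ((ss.filter (fun t => PySem.Str.startswith t "-")).map
          (fun t => PySem.Str.slice t (some 1) none))))
      ↔ (x ∈ ss ∨ ("-" ++ x) ∈ ss) := by
  rw [PySem.Set.mem_union, PySem.Set.mem_ofList, PySem.Set.mem_ofList]
  simp only [List.mem_map, List.mem_filter]
  constructor
  · rintro (h | ⟨t, ⟨ht, hs⟩, hx⟩)
    · exact Or.inl h
    · right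
      have := (pvStrip_iff t x).mp ⟨hs, hx⟩
      rwa [this] at ht
  · rintro (h | h)
    · exact Or.inl h
    · right
      refine ⟨"-" ++ x, ⟨h, ?_⟩, ?_⟩
      · exact ((pvStrip_iff ("-" ++ x) x).mpr rfl).1
      · exact ((pvStrip_iff ("-" ++ x) x).mpr rfl).2

-- the two-pointer merge over strictly increasing lists decides containment
theorem pvSubsetSorted_iff (xs ys : List String)
    (hx : xs.Pairwise (· < ·)) (hy : ys.Pairwise (· < ·)) :
    pvSubsetSorted xs ys = true ↔ ∀ x ∈ xs, x ∈ ys := by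
  induction ys generalizing xs with
  | nil =>
      cases xs with
      | nil => simp [pvSubsetSorted]
      | cons a as =>
          refine iff_of_false (by simp [pvSubsetSorted]) ?_
          intro hall
          exact absurd (hall a List.mem_cons_self) (List.not_mem_nil)
  | cons y ys ih =>
      cases xs with
      | nil => simp [pvSubsetSorted]
      | cons x xs =>
          rw [List.pairwise_cons] at hx hy
          by_cases hlt : y < x
          · rw [show pvSubsetSorted (x :: xs) (y :: ys) = pvSubsetSorted (x :: xs) ys by
              simp [pvSubsetSorted, hlt]]
            rw [ih _ (List.pairwise_cons.mpr hx) hy.2]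
            constructor
            · intro h a ha
              exact List.mem_cons_of_mem _ (h a ha)
            · intro h a ha
              rcases List.mem_cons.mp (h a ha) with rfl | h'
              · exfalso
                rcases List.mem_cons.mp ha with rfl | ha'
                · exact lt_irrefl _ hlt
                · exact lt_irrefl _ (hlt.trans (hx.1 _ ha'))
              · exact h'
          · by_cases heq : y = x
            · subst heq
              rw [show pvSubsetSorted (y :: xs) (y :: ys) = pvSubsetSorted xs ys by
                simp [pvSubsetSorted]]
              rw [ih _ hx.2 hy.2]
              constructor
              · intro h a ha
                rcases List.mem_cons.mp ha with rfl | ha'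
                · exact List.mem_cons_self
                · exact List.mem_cons_of_mem _ (h a ha')
              · intro h a ha
                rcases List.mem_cons.mp (h a (List.mem_cons_of_mem _ ha)) with rfl | h'
                · exact absurd (hx.1 _ ha) (lt_irrefl _)
                · exact h'
            · refine iff_of_false (by simp [pvSubsetSorted, hlt, heq]) ?_
              intro hall
              rcases List.mem_cons.mp (hall x List.mem_cons_self) with rfl | h'
              · exact heq rfl
              · have : x < y := lt_of_le_of_ne (not_lt.mp hlt) (Ne.symm heq)
                exact absurd (this.trans (hy.1 _ h')) (lt_irrefl _)

-- sorting a Nodup list by the identity key gives a strictly increasing list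
theorem pvSorted_pairwise_lt (l : List String) (h : l.Nodup) :
    (PySem.List.sorted l (fun x => x) false).Pairwise (· < ·) := by
  have hle := PySem.List.sorted_pairwise l (fun x => x) (κ := String)
  have hnd : (PySem.List.sorted l (fun x => x) false).Nodup :=
    (PySem.List.sorted_perm l (fun x => x) false).nodup_iff.mpr h
  have := List.Pairwise.and hle hnd
  exact this.imp (fun ⟨h1, h2⟩ => lt_of_le_of_ne h1 h2)

-- ===== VERDICT (by name: the statement is the Claim_ definition above) =====
theorem equal_up_to_sign_spec : Claim_equal_equal_up_to_sign := by
  intro u s _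
  unfold Spec_equal_up_to_sign equal_up_to_sign equal_up_to_sign_alt
  have hsset : (if PySem.Set.contains (PySem.Set.ofList s) "0"
                then PySem.Set.discard (PySem.Set.ofList s) "0"
                else PySem.Set.ofList s)
              = PySem.Set.discard (PySem.Set.ofList s) "0" := by
    by_cases h : PySem.Set.contains (PySem.Set.ofList s) "0" = true
    · rw [if_pos h]
    · rw [if_neg h,
        pvDiscard_of_not_mem _ _ (fun hm => h ((PySem.Set.contains_iff _ _).mpr hm))]
  simp only [hsset, pvDiff_singleton]
  set ss := PySem.Set.discard (PySem.Set.ofList s) "0" with hss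
  set us := PySem.Set.ofList u with hus
  have hnd_ss : ss.Nodup := PySem.Set.nodup_discard _ _ (PySem.Set.nodup_ofList s)
  have hguard : ((PySem.List.sorted us (fun x => x) false).length
        ≠ (PySem.List.sorted ss (fun x => x) false).length)
      ↔ (PySem.Set.len us ≠ PySem.Set.len ss) := by
    simp [PySem.List.length_sorted, PySem.Set.len]
  by_cases h : PySem.Set.len us ≠ PySem.Set.len ss
  · rw [if_pos h, if_pos (hguard.mpr h)]
  · rw [if_neg h, if_neg (fun hh => h (hguard.mp hh))]
    -- membership in the sorted signed list = membership in ss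
    set sl := PySem.List.sorted ss (fun x => x) false with hsl
    have hmem_sl : ∀ x, x ∈ sl ↔ x ∈ ss := fun x => PySem.List.mem_sorted _ _ _ _
    have hnd_sl : sl.Nodup :=
      (PySem.List.sorted_perm ss (fun x => x) false).nodup_iff.mpr hnd_ss
    set og := PySem.Set.union (PySem.Set.ofList sl)
      (PySem.Set.ofList ((sl.filter (fun t => PySem.Str.startswith t "-")).map
        (fun t => PySem.Str.slice t (some 1) none))) with hog
    have hnd_og : og.Nodup :=
      PySem.Set.nodup_union _ _ (PySem.Set.nodup_ofList sl)
    rw [pvALoop_eq_all, Bool.eq_iff_iff, List.all_eq_true,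
      pvSubsetSorted_iff _ _
        (by rw [hus]; exact PySem.List.sorted_ofList_pairwise_lt u)
        (pvSorted_pairwise_lt og hnd_og)]
    constructor
    · intro hall x hx
      rw [PySem.List.mem_sorted _ _ _ _] at hx ⊢
      have := hall x hx
      rcases Bool.or_eq_true .. |>.mp this with h1 | h1
      · exact (pvMem_origins sl x).mpr (Or.inl ((hmem_sl x).mpr ((PySem.Set.contains_iff _ _).mp h1)))
      · exact (pvMem_origins sl x).mpr (Or.inr ((hmem_sl _).mpr ((PySem.Set.contains_iff _ _).mp h1)))
    · intro hsub x hx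
      have hx' : x ∈ PySem.List.sorted us (fun x => x) false := (PySem.List.mem_sorted _ _ _ _).mpr hx
      have := (pvMem_origins sl x).mp ((PySem.List.mem_sorted _ _ _ _).mp (hsub x hx'))
      rcases this with h1 | h1
      · exact Bool.or_eq_true .. |>.mpr (Or.inl ((PySem.Set.contains_iff _ _).mpr ((hmem_sl x).mp h1)))
      · exact Bool.or_eq_true .. |>.mpr (Or.inr ((PySem.Set.contains_iff _ _).mpr ((hmem_sl _).mp h1)))
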